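-- pv_equiv track=rewrite | github.com/Haliacal/Sudoku-Solver | solver.py | nineNumCheck
-- ===== SOURCE A (Python) =====
-- def nineNumCheck(Board_array, allow_zeroes=False):
--   check = True
--   for i in Board_array:
--     # i is each line in the array
--
--     # Allow zeroes for ingame and endgame results
--     if(not allow_zeroes): DIGITS  = [1,2,3,4,5,6,7,8,9]
--     else: DIGITS  = [1,2,3,4,5,6,7,8,9,0]
--     for j in i:
--       # removes the corresponding number if in digits
--       # if it isn't there then there are two numbers in the same line
--       if(j not in DIGITS):
--         check = False
--         break
--       else:
--         if(allow_zeroes and j == 0): continue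
--         else: DIGITS.remove(j)
--   return check
-- ===== SOURCE B (Python) =====
-- def nineNumCheck(Board_array, allow_zeroes=False):
--     lo = 0 if allow_zeroes else 1
--     return all(
--         all(lo <= j <= 9 for j in row)
--         and all(row.count(d) <= 1 for d in range(1, 10))
--         for row in Board_array
--     )
-- ===== Notes on version B (the rewrite author's own statement) =====
-- stated objective: simpler
-- what changed: Replaces the remove-as-you-go mutable DIGITS list and break/continue loops with a single all() comprehension: each row is checked by a range test plus count(d)<=1 for d in 1..9 (zeros, when allowed, are unconstrained by counts).
import Mathlib
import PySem

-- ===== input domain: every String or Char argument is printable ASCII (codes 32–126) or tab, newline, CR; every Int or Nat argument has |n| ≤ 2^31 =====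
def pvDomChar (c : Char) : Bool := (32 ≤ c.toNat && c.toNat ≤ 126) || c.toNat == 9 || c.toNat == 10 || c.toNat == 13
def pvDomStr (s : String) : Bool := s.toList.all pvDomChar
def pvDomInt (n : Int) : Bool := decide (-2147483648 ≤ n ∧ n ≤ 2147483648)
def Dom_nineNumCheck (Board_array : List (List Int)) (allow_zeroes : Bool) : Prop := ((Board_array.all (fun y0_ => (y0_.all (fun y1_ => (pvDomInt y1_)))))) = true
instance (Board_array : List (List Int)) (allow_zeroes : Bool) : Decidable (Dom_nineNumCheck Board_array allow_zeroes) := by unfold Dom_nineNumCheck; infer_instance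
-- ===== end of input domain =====

-- B replaces A's remove-as-you-go DIGITS mutation and break/continue loops by a single
-- all-quantified pass per row: a range test plus count(d) <= 1 for each d in 1..9 (simpler).


-- ===== PORT A =====
-- inner 'for j in i' loop of A: state is (DIGITS, check); 'break' returns false immediately.
def pvRowLoopA (digits : List Int) (row : List Int) (allow_zeroes : Bool) (check : Bool) : Bool :=
  match row with
  | [] => check
  | j :: rest =>
    if ¬ digits.contains j then
      false                                   -- check = False; break
    else if allow_zeroes && j == 0 then
      pvRowLoopA digits rest allow_zeroes check   -- continue
    else
      -- DIGITS.remove(j): j ∈ digits here, so remove? is some; getD is exact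
      pvRowLoopA ((PySem.List.remove? digits j).getD digits) rest allow_zeroes check

def nineNumCheck (Board_array : List (List Int)) (allow_zeroes : Bool) : Bool :=
  Board_array.foldl
    (fun check i =>
      let DIGITS : List Int :=
        if ¬ allow_zeroes then [1,2,3,4,5,6,7,8,9] else [1,2,3,4,5,6,7,8,9,0]
      pvRowLoopA DIGITS i allow_zeroes check)
    true

-- ===== PORT B =====
def nineNumCheck_alt (Board_array : List (List Int)) (allow_zeroes : Bool) : Bool :=
  let lo : Int := if allow_zeroes then 0 else 1
  Board_array.all (fun row =>
    (row.all (fun j => decide (lo ≤ j ∧ j ≤ 9))) &&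
    ((PySem.List.pyRange 1 10 1).all (fun d => PySem.List.count row d ≤ 1)))

-- ===== PRECONDITION & SPEC =====
def Spec_nineNumCheck (Board_array : List (List Int)) (allow_zeroes : Bool) (out : Bool) : Prop := out = nineNumCheck_alt Board_array allow_zeroes
instance (Board_array : List (List Int)) (allow_zeroes : Bool) (out : Bool) : Decidable (Spec_nineNumCheck Board_array allow_zeroes out) := by unfold Spec_nineNumCheck; infer_instance

-- ===== CLAIM (what is proved, stated in full; the proofs are below) =====
def Claim_equal_nineNumCheck : Prop := ∀ (Board_array : List (List Int)) (allow_zeroes : Bool), Dom_nineNumCheck Board_array allow_zeroes → Spec_nineNumCheck Board_array allow_zeroes (nineNumCheck Board_array allow_zeroes)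

-- ===== LEMMAS AND PROOFS =====

-- the inner loop never recovers once check is false
theorem pvRowLoopA_false (digits row : List Int) (az : Bool) :
    pvRowLoopA digits row az false = false := by
  induction row generalizing digits with
  | nil => rfl
  | cons j rest ih => simp only [pvRowLoopA]; split_ifs <;> simp [ih]

-- the inner loop only ever returns its incoming check or false
theorem pvRowLoopA_factor (digits row : List Int) (az : Bool) (check : Bool) :
    pvRowLoopA digits row az check = (check && pvRowLoopA digits row az true) := by
  cases check
  · simp [pvRowLoopA_false]
  · simp

-- characterisation of the inner loop (for a duplicate-free DIGITS state)
theorem pvRowLoopA_char (digits row : List Int) (az : Bool) (hnd : digits.Nodup) :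
    pvRowLoopA digits row az true =
      (row.all (fun j => digits.contains j) &&
       digits.all (fun d => (az && d == 0) || PySem.List.count row d ≤ 1)) := by
  induction row generalizing digits with
  | nil => simp [pvRowLoopA, PySem.List.count]
  | cons j rest ih =>
    by_cases h1 : j ∈ digits
    · rw [show pvRowLoopA digits (j :: rest) az true
          = (if az && j == 0 then pvRowLoopA digits rest az true
             else pvRowLoopA ((PySem.List.remove? digits j).getD digits) rest az true) by
        simp [pvRowLoopA, h1]]
      by_cases h2 : (az && j == 0) = true
      · -- az = true and j = 0: nothing removed; counts of d ≠ 0 unchanged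
        rw [if_pos h2, ih digits hnd]
        have h2' : az = true ∧ j = 0 := by simpa using h2
        obtain ⟨haz, hj⟩ := h2'
        subst hj
        rw [Bool.eq_iff_iff]
        simp only [Bool.and_eq_true, List.all_eq_true, List.all_cons,
          List.contains_eq_mem, decide_eq_true_eq, Bool.or_eq_true, haz,
          Bool.true_and, beq_iff_eq, PySem.List.count_eq]
        have hc : ∀ d : Int, d ≠ 0 → List.count d (0 :: rest) = List.count d rest := by
          intro d hd0
          simp [Ne.symm hd0]
        constructor
        · rintro ⟨hall, hcnt⟩
          refine ⟨⟨h1, hall⟩, fun d hd => ?_⟩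
          by_cases hd0 : d = 0
          · exact Or.inl hd0
          · rcases hcnt d hd with h | h
            · exact Or.inl h
            · exact Or.inr (by rw [hc d hd0]; exact h)
        · rintro ⟨⟨_, hall⟩, hcnt⟩
          refine ⟨hall, fun d hd => ?_⟩
          by_cases hd0 : d = 0
          · exact Or.inl hd0
          · rcases hcnt d hd with h | h
            · exact Or.inl h
            · exact Or.inr (by rw [hc d hd0] at h; exact h)
      · -- j removed from DIGITS
        rw [if_neg h2, PySem.List.remove?_eq_some_erase digits j h1, Option.getD_some,
          ih _ (hnd.erase j)]
        have hmem_erase : ∀ x, x ∈ digits.erase j ↔ x ∈ digits ∧ x ≠ j := by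
          intro x; rw [hnd.mem_erase_iff]; tauto
        rw [Bool.eq_iff_iff]
        simp only [Bool.and_eq_true, List.all_eq_true, List.all_cons,
          List.contains_eq_mem, decide_eq_true_eq, Bool.or_eq_true, beq_iff_eq,
          PySem.List.count_eq, List.count_cons, hmem_erase]
        constructor
        · rintro ⟨hall, hcnt⟩
          refine ⟨⟨h1, fun x hx => (hall x hx).1⟩, fun d hd => ?_⟩
          by_cases hdz : az = true ∧ d = 0
          · exact Or.inl hdz
          · right
            by_cases hdj : d = j
            · subst hdj
              have hnm : d ∉ rest := fun hmem => (hall d hmem).2 rfl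
              simp [List.count_eq_zero_of_not_mem hnm]
            · rcases hcnt d ⟨hd, hdj⟩ with h | h
              · exact absurd h hdz
              · have hne : ¬ (j = d) := fun h' => hdj h'.symm
                simpa [hne] using h
        · rintro ⟨⟨_, hall⟩, hcnt⟩
          constructor
          · intro x hx
            refine ⟨hall x hx, fun hxj => ?_⟩
            subst hxj
            rcases hcnt x h1 with h | h
            · exact h2 (by simp [h.1, h.2])
            · have hx1 : List.count x rest + 1 ≤ 1 := by simpa using h
              have hx0 : List.count x rest = 0 := by omega
              rw [List.count_eq_zero] at hx0
              exact hx0 hx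
          · intro d hd
            rcases hcnt d hd.1 with h | h
            · exact Or.inl h
            · right
              have hne : ¬ (j = d) := fun h' => hd.2 h'.symm
              simp only [hne, if_false] at h
              simpa using h
    · simp [pvRowLoopA, h1, List.all_cons]

-- the outer Bool accumulator folds to List.all
theorem pvFoldA_all (b : List (List Int)) (f : List Int → Bool) :
    b.foldl (fun check i => (check && f i)) true = b.all f := by
  have gen : ∀ (l : List (List Int)) (c : Bool),
      l.foldl (fun check i => (check && f i)) c = (c && l.all f) := by
    intro l
    induction l with
    | nil => simp
    | cons y ys ihy => intro c; simp [List.foldl_cons, ihy, Bool.and_assoc]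
  simpa using gen b true

-- per-row equality between A's characterised row check and B's row check
theorem pvRow_eq (row : List Int) (az : Bool) :
    pvRowLoopA (if ¬ az then [1,2,3,4,5,6,7,8,9] else [1,2,3,4,5,6,7,8,9,0]) row az true =
      ((row.all (fun j => decide ((if az then (0:Int) else 1) ≤ j ∧ j ≤ 9))) &&
       ((PySem.List.pyRange 1 10 1).all (fun d => PySem.List.count row d ≤ 1))) := by
  have hrange : PySem.List.pyRange 1 10 1 = ([1,2,3,4,5,6,7,8,9] : List Int) := by decide
  have hmem9 : ∀ x : Int, x ∈ ([1,2,3,4,5,6,7,8,9] : List Int) ↔ 1 ≤ x ∧ x ≤ 9 := by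
    intro x; constructor
    · intro h; fin_cases h <;> norm_num
    · intro h; simp only [List.mem_cons, List.not_mem_nil, or_false]; omega
  have hmem10 : ∀ x : Int, x ∈ ([1,2,3,4,5,6,7,8,9,0] : List Int) ↔ 0 ≤ x ∧ x ≤ 9 := by
    intro x; constructor
    · intro h; fin_cases h <;> norm_num
    · intro h; simp only [List.mem_cons, List.not_mem_nil, or_false]; omega
  cases az with
  | false =>
    rw [show (if ¬ (false:Bool) = true then ([1,2,3,4,5,6,7,8,9] : List Int) else [1,2,3,4,5,6,7,8,9,0]) = [1,2,3,4,5,6,7,8,9] from by norm_num,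
        show (if (false:Bool) = true then (0:Int) else 1) = 1 from by norm_num,
        pvRowLoopA_char _ _ _ (by decide), hrange, Bool.eq_iff_iff]
    simp only [Bool.and_eq_true, List.all_eq_true, decide_eq_true_eq,
      List.contains_eq_mem, Bool.false_and, Bool.false_or, hmem9]
  | true =>
    rw [show (if ¬ (true:Bool) = true then ([1,2,3,4,5,6,7,8,9] : List Int) else [1,2,3,4,5,6,7,8,9,0]) = [1,2,3,4,5,6,7,8,9,0] from by norm_num,
        show (if (true:Bool) = true then (0:Int) else 1) = 0 from by norm_num,
        pvRowLoopA_char _ _ _ (by decide), hrange, Bool.eq_iff_iff]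
    simp only [Bool.and_eq_true, List.all_eq_true, decide_eq_true_eq,
      List.contains_eq_mem, Bool.true_and, Bool.or_eq_true, beq_iff_eq,
      hmem9, hmem10]
    constructor
    · rintro ⟨hmem, hcnt⟩
      refine ⟨hmem, fun d hd => ?_⟩
      rcases hcnt d ⟨by omega, hd.2⟩ with h | h
      · exact absurd h (by omega)
      · exact h
    · rintro ⟨hmem, hcnt⟩
      refine ⟨hmem, fun d hd => ?_⟩
      by_cases hd0 : d = 0
      · exact Or.inl hd0
      · exact Or.inr (hcnt d ⟨by omega, hd.2⟩)

-- ===== VERDICT (by name: the statement is the Claim_ definition above) =====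
theorem nineNumCheck_spec : Claim_equal_nineNumCheck := by
  intro b az _
  unfold Spec_nineNumCheck nineNumCheck nineNumCheck_alt
  rw [show (fun check i => pvRowLoopA (if ¬ az then [1,2,3,4,5,6,7,8,9] else ([1,2,3,4,5,6,7,8,9,0] : List Int)) i az check)
        = (fun check i => (check && pvRowLoopA (if ¬ az then [1,2,3,4,5,6,7,8,9] else [1,2,3,4,5,6,7,8,9,0]) i az true))
      from funext fun c => funext fun i => pvRowLoopA_factor _ i az c]
  rw [pvFoldA_all]
  exact congrArg b.all (funext fun row => pvRow_eq row az)
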